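-- pv_equiv track=rewrite | github.com/Sloanstar/dnsF5XC | tools/helpers.py | endify
-- ===== SOURCE A (Python) =====
-- def endify(itr):
--         """
--         Like enumerate() except returns a bool if this is the last item instead of the number
--         """
--         itr = iter(itr)
--         has_item = False
--         ended = False
--         next_item = None
--         while not ended:
--             try:
--                 next_item = next(itr)
--             except StopIteration:
--                 ended = True
--             if has_item:
--                 yield ended, item
--             has_item = True
--             item = next_item
-- ===== SOURCE B (Python) =====
-- def endify(itr):
--     """
--     Like enumerate() except returns a bool if this is the last item instead of the number
--     """
--     items = list(itr)
--     flags = [False] * (len(items) - 1) + [True] if items else []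
--     yield from zip(flags, items)
-- ===== Notes on version B (the rewrite author's own statement) =====
-- stated objective: alternative
-- what changed: Drops A's one-item-lookahead buffer and sentinel flags entirely: B materializes the items, builds a parallel last-item flag list [False]*(n-1)+[True], and zips it with the items, so no element is ever buffered or peeked (trades A's lazy streaming for two staged passes; return value identical).
import Mathlib
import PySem

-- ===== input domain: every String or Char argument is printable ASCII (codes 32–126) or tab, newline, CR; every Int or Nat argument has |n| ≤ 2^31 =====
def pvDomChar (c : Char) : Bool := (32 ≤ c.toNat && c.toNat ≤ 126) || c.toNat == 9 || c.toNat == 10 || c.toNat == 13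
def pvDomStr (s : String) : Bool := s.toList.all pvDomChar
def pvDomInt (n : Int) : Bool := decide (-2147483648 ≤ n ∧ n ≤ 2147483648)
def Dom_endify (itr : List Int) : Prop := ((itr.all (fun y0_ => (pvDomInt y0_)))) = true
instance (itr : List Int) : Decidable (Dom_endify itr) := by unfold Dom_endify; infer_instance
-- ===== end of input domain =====

-- B drops A's one-item lookahead buffer: it builds a parallel flag list [False]*(n-1)+[True] and
-- zips it with the materialized items (B is not lazy, unlike A; the return value is identical).

-- ===== PORT A =====
-- A's while loop: each iteration pulls next_item (StopIteration sets ended); once has_item is set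
-- it yields (ended, item) and shifts item := next_item. Transcribed as recursion on the remaining
-- iterator with the loop state (has_item, item); the initial unbound 'item' is never emitted.
def endifyLoopA (itr : List Int) (has_item : Bool) (item : Int) : List (Bool × Int) :=
  match itr with
  | [] => if has_item then [(true, item)] else []      -- next() raised: ended = True, yield if has_item, loop exits
  | x :: rest => (if has_item then [(false, item)] else []) ++ endifyLoopA rest true x

def endify (itr : List Int) : List (Bool × Int) :=
  endifyLoopA itr false 0   -- 0 stands for the unbound initial 'item'; never emitted (has_item = False)

-- ===== PORT B =====
-- Source B: flags = [False]*(len(items)-1) + [True] if items else []; yield from zip(flags, items)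
def endify_alt (itr : List Int) : List (Bool × Int) :=
  let flags : List Bool :=
    if itr ≠ [] then List.replicate (itr.length - 1) false ++ [true] else []
  flags.zip itr

-- ===== PRECONDITION & SPEC =====
def Spec_endify (itr : List Int) (out : List (Bool × Int)) : Prop := out = endify_alt itr
instance (itr : List Int) (out : List (Bool × Int)) : Decidable (Spec_endify itr out) := by unfold Spec_endify; infer_instance

-- ===== CLAIM (what is proved, stated in full; the proofs are below) =====
def Claim_equal_endify : Prop := ∀ (itr : List Int), Dom_endify itr → Spec_endify itr (endify itr)

-- ===== LEMMAS AND PROOFS =====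
-- Once has_item is set, A's loop over the remaining list l with buffered item x produces exactly
-- the flag list for x::l zipped with x::l.
theorem endifyLoopA_zip (l : List Int) (x : Int) :
    endifyLoopA l true x = (List.replicate l.length false ++ [true]).zip (x :: l) := by
  induction l generalizing x with
  | nil => rfl
  | cons y r ih => simp [endifyLoopA, ih y, List.replicate_succ]

-- ===== VERDICT (by name: the statement is the Claim_ definition above) =====
theorem endify_spec : Claim_equal_endify := by
  intro itr _
  unfold Spec_endify endify endify_alt
  cases itr with
  | nil => rfl
  | cons x rest =>
    simp only [endifyLoopA, if_neg, List.nil_append, Bool.false_eq_true, not_false_iff]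
    simp [endifyLoopA_zip rest x]
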